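-- pv_equiv track=rewrite | github.com/labbces/sugarcane_RNAome | scripts/coExpression/classifyGroups/annotateIndividualGroups.py | classify_group
-- ===== SOURCE A (Python) =====
-- def classify_group(group_data):
--     classifications = set()
--     for item in group_data:
--         if "protein-coding" in item:
--             classifications.add("protein-coding")
--         elif "non-coding" in item:
--             classifications.add("non-coding")
--         else:
--             classifications.add("protein and non-coding")
--     if len(classifications) == 1:
--         return classifications.pop()
--     elif "protein-coding" in classifications and "non-coding" in classifications:
--         return "protein and non-coding"
--     else:
--         return "unknown"
-- ===== SOURCE B (Python) =====
-- def classify_group(group_data):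
--     p = any("protein-coding" in item for item in group_data)
--     n = any("protein-coding" not in item and "non-coding" in item for item in group_data)
--     o = any("protein-coding" not in item and "non-coding" not in item for item in group_data)
--     if p and n:
--         return "protein and non-coding"
--     elif p and not n and not o:
--         return "protein-coding"
--     elif n and not p and not o:
--         return "non-coding"
--     elif o and not p and not n:
--         return "protein and non-coding"
--     else:
--         return "unknown"
-- ===== Notes on version B (the rewrite author's own statement) =====
-- stated objective: alternative
-- what changed: Replaces the set-building loop plus set-size/membership decision with three independent any() substring scans and a purely boolean flag decision; no set is ever built.
import Mathlib
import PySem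

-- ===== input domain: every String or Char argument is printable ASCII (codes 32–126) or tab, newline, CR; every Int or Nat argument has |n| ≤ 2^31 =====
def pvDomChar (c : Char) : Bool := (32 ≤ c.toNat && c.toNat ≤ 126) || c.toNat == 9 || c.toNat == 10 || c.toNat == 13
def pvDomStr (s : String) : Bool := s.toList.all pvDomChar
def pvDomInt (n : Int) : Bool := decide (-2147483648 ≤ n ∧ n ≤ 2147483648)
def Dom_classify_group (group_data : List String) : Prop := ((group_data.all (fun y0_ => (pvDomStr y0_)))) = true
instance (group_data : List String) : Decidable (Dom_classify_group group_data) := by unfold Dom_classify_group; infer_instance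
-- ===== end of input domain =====

-- B replaces A's set-building loop + set-size/membership decision by three independent any() scans
-- and a boolean flag decision (objective: alternative decomposition, same cost).

-- ===== PORT A =====
-- classifications.pop() is only reached when the set has exactly one element, so taking the head of the
-- one-element Set list is exact there.
def classify_group (group_data : List String) : String :=
  let classifications : PySem.Set String :=
    group_data.foldl (fun s item =>
      if PySem.Str.isIn "protein-coding" item then PySem.Set.add s "protein-coding"
      else if PySem.Str.isIn "non-coding" item then PySem.Set.add s "non-coding"
      else PySem.Set.add s "protein and non-coding") PySem.Set.empty
  if PySem.Set.len classifications = 1 then classifications.headD ""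
  else if PySem.Set.contains classifications "protein-coding" &&
          PySem.Set.contains classifications "non-coding" then "protein and non-coding"
  else "unknown"

-- ===== PORT B =====
def classify_group_alt (group_data : List String) : String :=
  let p := group_data.any (fun item => PySem.Str.isIn "protein-coding" item)
  let n := group_data.any (fun item => !PySem.Str.isIn "protein-coding" item && PySem.Str.isIn "non-coding" item)
  let o := group_data.any (fun item => !PySem.Str.isIn "protein-coding" item && !PySem.Str.isIn "non-coding" item)
  if p && n then "protein and non-coding"
  else if p && !n && !o then "protein-coding"
  else if n && !p && !o then "non-coding"
  else if o && !p && !n then "protein and non-coding"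
  else "unknown"

-- ===== PRECONDITION & SPEC =====
def Spec_classify_group (group_data : List String) (out : String) : Prop := out = classify_group_alt group_data
instance (group_data : List String) (out : String) : Decidable (Spec_classify_group group_data out) := by unfold Spec_classify_group; infer_instance

-- ===== CLAIM (what is proved, stated in full; the proofs are below) =====
def Claim_equal_classify_group : Prop := ∀ (group_data : List String), Dom_classify_group group_data → Spec_classify_group group_data (classify_group group_data)

-- ===== LEMMAS AND PROOFS =====

-- the label A's loop body assigns to one item
def pvTag (item : String) : String :=
  if PySem.Str.isIn "protein-coding" item then "protein-coding"
  else if PySem.Str.isIn "non-coding" item then "non-coding"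
  else "protein and non-coding"

theorem pvTag_cases (a : String) :
    pvTag a = "protein-coding" ∨ pvTag a = "non-coding" ∨ pvTag a = "protein and non-coding" := by
  unfold pvTag; split_ifs <;> simp

theorem pvFold_eq (group_data : List String) :
    group_data.foldl (fun s item =>
      if PySem.Str.isIn "protein-coding" item then PySem.Set.add s "protein-coding"
      else if PySem.Str.isIn "non-coding" item then PySem.Set.add s "non-coding"
      else PySem.Set.add s "protein and non-coding") PySem.Set.empty
    = PySem.Set.ofList (group_data.map pvTag) := by
  rw [PySem.Set.ofList_eq_foldl, List.foldl_map]
  congr 1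
  funext s item
  unfold pvTag
  split_ifs <;> rfl

theorem pvTag_eq_pc (a : String) :
    pvTag a = "protein-coding" ↔ PySem.Str.isIn "protein-coding" a = true := by
  unfold pvTag; split_ifs with h1 h2 <;> simp_all

theorem pvTag_eq_nc (a : String) :
    pvTag a = "non-coding" ↔
      (!PySem.Str.isIn "protein-coding" a && PySem.Str.isIn "non-coding" a) = true := by
  unfold pvTag; split_ifs with h1 h2 <;> simp_all

theorem pvTag_eq_other (a : String) :
    pvTag a = "protein and non-coding" ↔
      (!PySem.Str.isIn "protein-coding" a && !PySem.Str.isIn "non-coding" a) = true := by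
  unfold pvTag; split_ifs with h1 h2 <;> simp_all

theorem pvMem_pc (gd : List String) :
    "protein-coding" ∈ gd.map pvTag ↔
      gd.any (fun item => PySem.Str.isIn "protein-coding" item) = true := by
  simp only [List.mem_map, List.any_eq_true]
  constructor
  · rintro ⟨a, ha, h⟩; exact ⟨a, ha, (pvTag_eq_pc a).1 h⟩
  · rintro ⟨a, ha, h⟩; exact ⟨a, ha, (pvTag_eq_pc a).2 h⟩

theorem pvMem_nc (gd : List String) :
    "non-coding" ∈ gd.map pvTag ↔
      gd.any (fun item => !PySem.Str.isIn "protein-coding" item && PySem.Str.isIn "non-coding" item) = true := by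
  simp only [List.mem_map, List.any_eq_true]
  constructor
  · rintro ⟨a, ha, h⟩; exact ⟨a, ha, (pvTag_eq_nc a).1 h⟩
  · rintro ⟨a, ha, h⟩; exact ⟨a, ha, (pvTag_eq_nc a).2 h⟩

theorem pvMem_other (gd : List String) :
    "protein and non-coding" ∈ gd.map pvTag ↔
      gd.any (fun item => !PySem.Str.isIn "protein-coding" item && !PySem.Str.isIn "non-coding" item) = true := by
  simp only [List.mem_map, List.any_eq_true]
  constructor
  · rintro ⟨a, ha, h⟩; exact ⟨a, ha, (pvTag_eq_other a).1 h⟩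
  · rintro ⟨a, ha, h⟩; exact ⟨a, ha, (pvTag_eq_other a).2 h⟩

-- a nodup list whose members are all equal to a, and which contains a, is [a]
theorem pvSingleton {s : List String} (hn : s.Nodup) (a : String)
    (ha : a ∈ s) (hall : ∀ x ∈ s, x = a) : s = [a] := by
  cases s with
  | nil => cases ha
  | cons b t =>
    have hb : b = a := hall b (List.mem_cons_self ..)
    cases t with
    | nil => simp [hb]
    | cons c u =>
      have hc : c = a := hall c (by simp)
      exfalso
      have : b ∈ c :: u := by simp [hb, hc]
      exact (List.nodup_cons.1 hn).1 this

theorem pvLen_ne_one {s : List String} (a b : String) (ha : a ∈ s) (hb : b ∈ s)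
    (hab : a ≠ b) : s.length ≠ 1 := by
  intro h
  rcases List.length_eq_one_iff.1 h with ⟨x, rfl⟩
  simp at ha hb
  exact hab (ha.trans hb.symm)

theorem classify_group_spec' : ∀ (group_data : List String),
    classify_group group_data = classify_group_alt group_data := by
  intro gd
  unfold classify_group classify_group_alt
  rw [pvFold_eq]
  set s : PySem.Set String := PySem.Set.ofList (gd.map pvTag) with hs
  have hnodup : s.Nodup := PySem.Set.nodup_ofList _
  have hmem : ∀ x, x ∈ s ↔ x ∈ gd.map pvTag := fun x => PySem.Set.mem_ofList _ x
  have hcases : ∀ x ∈ s, x = "protein-coding" ∨ x = "non-coding" ∨ x = "protein and non-coding" := by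
    intro x hx
    rcases List.mem_map.1 ((hmem x).1 hx) with ⟨a, _, rfl⟩
    exact pvTag_cases a
  have hP := (pvMem_pc gd).symm.trans (hmem "protein-coding").symm
  have hN := (pvMem_nc gd).symm.trans (hmem "non-coding").symm
  have hO := (pvMem_other gd).symm.trans (hmem "protein and non-coding").symm
  cases hp : gd.any (fun item => PySem.Str.isIn "protein-coding" item) <;>
  cases hn : gd.any (fun item => !PySem.Str.isIn "protein-coding" item && PySem.Str.isIn "non-coding" item) <;>
  cases ho : gd.any (fun item => !PySem.Str.isIn "protein-coding" item && !PySem.Str.isIn "non-coding" item) <;>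
  simp only [hp, hn, ho, Bool.true_and, Bool.false_and, Bool.and_true, Bool.and_false,
    Bool.not_true, Bool.not_false, if_true, if_false]
  -- case F F F : no item at all, s is empty → A hits no branch, B has no flag: "unknown"
  · have hempty : s = [] := by
      by_contra hne
      obtain ⟨b, hb⟩ := List.exists_mem_of_ne_nil s hne
      rcases hcases b hb with h | h | h
      · rw [h] at hb; exact absurd ((hP.2 hb).symm.trans hp) (by decide)
      · rw [h] at hb; exact absurd ((hN.2 hb).symm.trans hn) (by decide)
      · rw [h] at hb; exact absurd ((hO.2 hb).symm.trans ho) (by decide)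
    rw [hempty]; rfl
  -- case F F T : s = ["protein and non-coding"]
  · have hall : ∀ x ∈ s, x = "protein and non-coding" := by
      intro x hx
      rcases hcases x hx with h | h | h
      · rw [h] at hx; exact absurd ((hP.2 hx).symm.trans hp) (by decide)
      · rw [h] at hx; exact absurd ((hN.2 hx).symm.trans hn) (by decide)
      · exact h
    rw [pvSingleton hnodup _ (hO.1 ho) hall]; rfl
  -- case F T F : s = ["non-coding"]
  · have hall : ∀ x ∈ s, x = "non-coding" := by
      intro x hx
      rcases hcases x hx with h | h | h
      · rw [h] at hx; exact absurd ((hP.2 hx).symm.trans hp) (by decide)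
      · exact h
      · rw [h] at hx; exact absurd ((hO.2 hx).symm.trans ho) (by decide)
    rw [pvSingleton hnodup _ (hN.1 hn) hall]; rfl
  -- case F T T : two labels, no "protein-coding" → "unknown" both sides
  · have h1 := hN.1 hn
    have h2 := hO.1 ho
    have hne : s.length ≠ 1 := pvLen_ne_one _ _ h1 h2 (by decide)
    have hcp : "protein-coding" ∉ s := fun hx => absurd ((hP.2 hx).symm.trans hp) (by decide)
    simp [PySem.Set.len, PySem.Set.contains, hne, hcp]
  -- case T F F : s = ["protein-coding"]
  · have hall : ∀ x ∈ s, x = "protein-coding" := by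
      intro x hx
      rcases hcases x hx with h | h | h
      · exact h
      · rw [h] at hx; exact absurd ((hN.2 hx).symm.trans hn) (by decide)
      · rw [h] at hx; exact absurd ((hO.2 hx).symm.trans ho) (by decide)
    rw [pvSingleton hnodup _ (hP.1 hp) hall]; rfl
  -- case T F T : two labels, no "non-coding" → "unknown" both sides
  · have h1 := hP.1 hp
    have h2 := hO.1 ho
    have hne : s.length ≠ 1 := pvLen_ne_one _ _ h1 h2 (by decide)
    have hcn : "non-coding" ∉ s := fun hx => absurd ((hN.2 hx).symm.trans hn) (by decide)
    simp [PySem.Set.len, PySem.Set.contains, hne, hcn]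
  -- case T T F : both coding labels present → "protein and non-coding" both sides
  · have h1 := hP.1 hp
    have h2 := hN.1 hn
    have hne : s.length ≠ 1 := pvLen_ne_one _ _ h1 h2 (by decide)
    simp [PySem.Set.len, PySem.Set.contains, hne, h1, h2]
  -- case T T T : both coding labels present → "protein and non-coding" both sides
  · have h1 := hP.1 hp
    have h2 := hN.1 hn
    have hne : s.length ≠ 1 := pvLen_ne_one _ _ h1 h2 (by decide)
    simp [PySem.Set.len, PySem.Set.contains, hne, h1, h2]

-- ===== VERDICT (by name: the statement is the Claim_ definition above) =====
theorem classify_group_spec : Claim_equal_classify_group := by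
  intro gd _
  unfold Spec_classify_group
  exact classify_group_spec' gd
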